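-- pv_equiv track=rewrite | github.com/xraygui/nbs-bl | sst_funcs/configuration.py | auto_add_devices_to_groups
-- ===== SOURCE A (Python) =====
-- def auto_add_devices_to_groups(beamline_config, devices):
--     for obj_key, obj_dict in devices.items():
--         if "_group" in obj_dict:
--             gkey = obj_dict["_group"]
--             if gkey not in beamline_config:
--                 beamline_config[gkey] = {}
--             group = beamline_config[gkey]
--             if "devices" not in group:
--                 group["devices"] = []
--             if obj_key not in group["devices"] and obj_key not in group.get(
--                 "exclude", []
--             ):
--                 group["devices"].append(obj_key)
--     return beamline_config
-- ===== SOURCE B (Python) =====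
-- def auto_add_devices_to_groups(beamline_config, devices):
--     # Phase 1: index device keys by their declared group, in device order.
--     groups = {}
--     for obj_key, obj_dict in devices.items():
--         if "_group" in obj_dict:
--             groups.setdefault(obj_dict["_group"], []).append(obj_key)
--     # Phase 2: assign each group's collected keys into the config.
--     for gkey, keys in groups.items():
--         if gkey not in beamline_config:
--             beamline_config[gkey] = {}
--         group = beamline_config[gkey]
--         if "devices" not in group:
--             group["devices"] = []
--         for obj_key in keys:
--             if obj_key not in group["devices"] and obj_key not in group.get(
--                 "exclude", []
--             ):
--                 group["devices"].append(obj_key)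
--     return beamline_config
-- ===== Notes on version B (the rewrite author's own statement) =====
-- stated objective: alternative
-- what changed: A's single per-device loop is replaced by a two-phase shape: first build an insertion-ordered index mapping each group key to its device keys, then assign group by group (lazily creating each config group and filtering against its devices/exclude lists).
import Mathlib
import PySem

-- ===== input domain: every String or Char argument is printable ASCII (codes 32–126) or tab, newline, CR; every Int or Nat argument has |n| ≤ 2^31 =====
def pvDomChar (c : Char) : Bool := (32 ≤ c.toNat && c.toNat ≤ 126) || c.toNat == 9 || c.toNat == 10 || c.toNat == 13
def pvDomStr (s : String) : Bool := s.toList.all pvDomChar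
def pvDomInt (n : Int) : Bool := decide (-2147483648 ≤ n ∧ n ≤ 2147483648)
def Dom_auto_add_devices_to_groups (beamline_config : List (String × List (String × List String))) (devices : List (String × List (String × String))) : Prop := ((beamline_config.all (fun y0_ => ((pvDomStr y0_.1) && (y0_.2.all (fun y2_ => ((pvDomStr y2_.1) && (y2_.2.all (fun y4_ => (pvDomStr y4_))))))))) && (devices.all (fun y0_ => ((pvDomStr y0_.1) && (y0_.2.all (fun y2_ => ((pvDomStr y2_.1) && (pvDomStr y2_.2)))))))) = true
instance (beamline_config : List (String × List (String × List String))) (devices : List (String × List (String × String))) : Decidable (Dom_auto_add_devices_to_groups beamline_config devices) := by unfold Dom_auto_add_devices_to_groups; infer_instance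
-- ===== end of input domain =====

-- B replaces A's single per-device loop by a two-phase shape (index device keys by group, then
-- assign group by group); objective: alternative decomposition, same cost. A mutates
-- beamline_config in place and B performs the same mutation; the equivalence proved is about the
-- returned mapping (dicts modelled as insertion-ordered association lists).

-- ===== PORT A =====
-- one iteration of A's loop body (transliteration, with in-place dict mutation as write-back)
def pvApplyDevA (d : PySem.Dict String (PySem.Dict String (List String))) (obj_key : String)
    (obj_dict : PySem.Dict String String) : PySem.Dict String (PySem.Dict String (List String)) :=
  match obj_dict.get? "_group" with
  | none => d
  | some gkey =>
    let d := if d.contains gkey then d else d.insert gkey PySem.Dict.empty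
    let group := d.getD gkey PySem.Dict.empty
    let group := if group.contains "devices" then group else group.insert "devices" ([] : List String)
    let devs := group.getD "devices" []
    let group := if ¬ obj_key ∈ devs ∧ ¬ obj_key ∈ group.getD "exclude" []
                 then group.insert "devices" (devs ++ [obj_key]) else group
    d.insert gkey group

def auto_add_devices_to_groups (beamline_config : List (String × List (String × List String))) (devices : List (String × List (String × String))) : List (String × List (String × List String)) :=
  ((devices.foldl (fun d p => pvApplyDevA d p.1 (PySem.Dict.mk p.2))
      (PySem.Dict.mk (beamline_config.map (fun q => (q.1, PySem.Dict.mk q.2))))).items).map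
    (fun q => (q.1, q.2.items))

-- ===== PORT B =====
-- B's inner loop body: append obj_key to group["devices"] unless present or excluded
def pvStepB (gr : PySem.Dict String (List String)) (obj_key : String) : PySem.Dict String (List String) :=
  let devs := gr.getD "devices" []
  if ¬ obj_key ∈ devs ∧ ¬ obj_key ∈ gr.getD "exclude" []
  then gr.insert "devices" (devs ++ [obj_key]) else gr

-- B's phase-2 body for one group
def pvProcessGroup (d : PySem.Dict String (PySem.Dict String (List String))) (gkey : String)
    (ks : List String) : PySem.Dict String (PySem.Dict String (List String)) :=
  let d := if d.contains gkey then d else d.insert gkey PySem.Dict.empty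
  let group := d.getD gkey PySem.Dict.empty
  let group := if group.contains "devices" then group else group.insert "devices" ([] : List String)
  let group := ks.foldl pvStepB group
  d.insert gkey group

-- B's phase 1: groups.setdefault(gkey, []).append(obj_key)
def pvIndex (devices : List (String × List (String × String))) : PySem.Dict String (List String) :=
  devices.foldl (fun g p =>
    match (PySem.Dict.mk p.2).get? "_group" with
    | none => g
    | some gk => g.modify gk [] (· ++ [p.1])) PySem.Dict.empty

def auto_add_devices_to_groups_alt (beamline_config : List (String × List (String × List String))) (devices : List (String × List (String × String))) : List (String × List (String × List String)) :=
  (((pvIndex devices).items.foldl (fun d q => pvProcessGroup d q.1 q.2)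
      (PySem.Dict.mk (beamline_config.map (fun q => (q.1, PySem.Dict.mk q.2))))).items).map
    (fun q => (q.1, q.2.items))

-- ===== PRECONDITION & SPEC =====
def Spec_auto_add_devices_to_groups (beamline_config : List (String × List (String × List String))) (devices : List (String × List (String × String))) (out : List (String × List (String × List String))) : Prop := out = auto_add_devices_to_groups_alt beamline_config devices
instance (beamline_config : List (String × List (String × List String))) (devices : List (String × List (String × String))) (out : List (String × List (String × List String))) : Decidable (Spec_auto_add_devices_to_groups beamline_config devices out) := by unfold Spec_auto_add_devices_to_groups; infer_instance

-- ===== CLAIM (what is proved, stated in full; the proofs are below) =====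
def Claim_equal_auto_add_devices_to_groups : Prop := ∀ (beamline_config : List (String × List (String × List String))) (devices : List (String × List (String × String))), Dom_auto_add_devices_to_groups beamline_config devices → Spec_auto_add_devices_to_groups beamline_config devices (auto_add_devices_to_groups beamline_config devices)

-- ===== LEMMAS AND PROOFS =====

-- proof-side normal form for a group update
def pvGrp (gr : PySem.Dict String (List String)) (ks : List String) : PySem.Dict String (List String) :=
  ks.foldl pvStepB (if gr.contains "devices" then gr else gr.insert "devices" ([] : List String))

def pvAssign (d : PySem.Dict String (PySem.Dict String (List String))) (obj_key gkey : String) :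
    PySem.Dict String (PySem.Dict String (List String)) :=
  d.insert gkey (pvGrp (d.getD gkey PySem.Dict.empty) [obj_key])

-- the (obj_key, gkey) pairs of devices that carry a "_group"
def pvGrouped (devices : List (String × List (String × String))) : List (String × String) :=
  devices.filterMap (fun p => ((PySem.Dict.mk p.2).get? "_group").map (fun g => (p.1, g)))

def pvGroupIndex (l : List (String × String)) : PySem.Dict String (List String) :=
  l.foldl (fun G q => G.modify q.2 [] (· ++ [q.1])) PySem.Dict.empty

lemma pvProcessGroup_eq (d : PySem.Dict String (PySem.Dict String (List String))) (g : String)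
    (ks : List String) :
    pvProcessGroup d g ks = d.insert g (pvGrp (d.getD g PySem.Dict.empty) ks) := by
  unfold pvProcessGroup pvGrp
  by_cases h : d.contains g
  · simp [h]
  · have hg : d.getD g PySem.Dict.empty = PySem.Dict.empty :=
      PySem.Dict.getD_of_not_contains d PySem.Dict.empty (by simpa using h)
    simp [h, PySem.Dict.getD_insert_self, PySem.Dict.insert_insert_self, hg,
      PySem.Dict.contains_empty]

lemma pvApplyDevA_eq (d : PySem.Dict String (PySem.Dict String (List String))) (k : String)
    (od : PySem.Dict String String) :
    pvApplyDevA d k od = match od.get? "_group" with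
      | none => d
      | some g => pvAssign d k g := by
  unfold pvApplyDevA pvAssign pvGrp pvStepB
  cases h : od.get? "_group" with
  | none => simp
  | some g =>
    by_cases hc : d.contains g
    · simp [hc]
    · have hg : d.getD g PySem.Dict.empty = PySem.Dict.empty :=
        PySem.Dict.getD_of_not_contains d PySem.Dict.empty (by simpa using hc)
      simp [hc, hg, PySem.Dict.getD_insert_self, PySem.Dict.insert_insert_self,
        PySem.Dict.contains_empty]

lemma pvFold_contains (ks : List String) (gr : PySem.Dict String (List String))
    (h : gr.contains "devices" = true) : (ks.foldl pvStepB gr).contains "devices" = true := by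
  induction ks generalizing gr with
  | nil => simpa
  | cons k ks ih =>
    apply ih
    unfold pvStepB
    by_cases hk : k ∉ gr.getD "devices" [] ∧ k ∉ gr.getD "exclude" []
    · simp [hk, PySem.Dict.contains_insert_self]
    · simp [hk, h]

lemma pvGrp_contains (gr : PySem.Dict String (List String)) (ks : List String) :
    (pvGrp gr ks).contains "devices" = true := by
  unfold pvGrp
  apply pvFold_contains
  by_cases h : gr.contains "devices" <;>
    simp [h, PySem.Dict.contains_insert_self]

lemma pvGrp_single (gr : PySem.Dict String (List String)) (k : String)
    (h : gr.contains "devices" = true) : pvGrp gr [k] = pvStepB gr k := by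
  unfold pvGrp; simp [h]

lemma pvGrp_snoc (gr : PySem.Dict String (List String)) (ks : List String) (k : String) :
    pvGrp gr (ks ++ [k]) = pvStepB (pvGrp gr ks) k := by
  unfold pvGrp; simp [List.foldl_append]

lemma pvAssign_processGroup (d : PySem.Dict String (PySem.Dict String (List String))) (g k : String)
    (ks : List String) :
    pvAssign (pvProcessGroup d g ks) k g = pvProcessGroup d g (ks ++ [k]) := by
  rw [pvProcessGroup_eq, pvProcessGroup_eq]
  unfold pvAssign
  simp [PySem.Dict.getD_insert_self, PySem.Dict.insert_insert_self,
    pvGrp_single _ _ (pvGrp_contains _ _), pvGrp_snoc]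

lemma pvInsert_comm {v w : PySem.Dict String (List String)}
    (d : PySem.Dict String (PySem.Dict String (List String))) {g g' : String}
    (hc : d.contains g = true) (hne : g' ≠ g) :
    (d.insert g v).insert g' w = (d.insert g' w).insert g v := by
  apply PySem.Dict.ext
  have hne' : (g' == g) = false := by simp [hne]
  have hne'' : (g == g') = false := by simp [Ne.symm hne]
  by_cases hc' : d.contains g'
  · simp only [PySem.Dict.items_insert, PySem.Dict.contains_insert, hne', hne'', hc, hc',
      Bool.false_or, if_pos, List.map_map]
    apply List.map_congr_left
    intro p _
    by_cases hp : p.1 == g <;> by_cases hp' : p.1 == g' <;>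
      simp_all [Function.comp, beq_iff_eq]
  · have hcf : d.contains g' = false := by simpa using hc'
    simp only [PySem.Dict.items_insert, PySem.Dict.contains_insert, hne', hne'', hc, hcf,
      Bool.false_or, List.map_append, List.map_map]
    simp
    exact fun h => absurd h hne

lemma pvAssign_comm (d : PySem.Dict String (PySem.Dict String (List String))) {g g' : String}
    (k : String) (ks : List String) (hc : d.contains g = true) (hne : g' ≠ g) :
    pvProcessGroup (pvAssign d k g) g' ks = pvAssign (pvProcessGroup d g' ks) k g := by
  rw [pvProcessGroup_eq, pvProcessGroup_eq]
  unfold pvAssign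
  simp only [PySem.Dict.getD_insert, if_neg hne, if_neg (Ne.symm hne)]
  exact pvInsert_comm d hc hne

lemma pvAssign_fold_comm (post : List (String × List String))
    (d : PySem.Dict String (PySem.Dict String (List String))) {g : String} (k : String)
    (hpost : ∀ q ∈ post, q.1 ≠ g) (hc : d.contains g = true) :
    post.foldl (fun d q => pvProcessGroup d q.1 q.2) (pvAssign d k g)
      = pvAssign (post.foldl (fun d q => pvProcessGroup d q.1 q.2) d) k g := by
  induction post generalizing d with
  | nil => rfl
  | cons q post ih =>
    simp only [List.foldl_cons]
    rw [pvAssign_comm d k q.2 hc (hpost q (by simp))]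
    apply ih
    · intro p hp; exact hpost p (by simp [hp])
    · rw [pvProcessGroup_eq, PySem.Dict.contains_insert]
      simp [hc]

lemma pvGroupIndex_nodup (l : List (String × String)) : (pvGroupIndex l).keys.Nodup := by
  unfold pvGroupIndex
  exact PySem.Dict.nodup_keys_foldl_modify_key _ _ _ _ _ PySem.Dict.nodup_keys_empty

lemma pvSplit_of_mem {α : Type} (l : List (String × α)) (g : String)
    (hnd : (l.map (·.1)).Nodup) (hmem : g ∈ l.map (·.1)) :
    ∃ pre ms post, l = pre ++ (g, ms) :: post ∧ (∀ q ∈ pre, q.1 ≠ g) ∧ (∀ q ∈ post, q.1 ≠ g) := by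
  induction l with
  | nil => simp at hmem
  | cons q l ih =>
    by_cases hq : q.1 = g
    · refine ⟨[], q.2, l, ?_, by simp, ?_⟩
      · simp [← hq]
      · intro p hp hpg
        have h1 : q.1 ∈ l.map (·.1) := by
          rw [hq, ← hpg]; exact List.mem_map_of_mem hp
        exact (List.nodup_cons.mp hnd).1 h1
    · have hmem' : g ∈ l.map (·.1) := by
        rcases List.mem_cons.mp hmem with h | h
        · exact absurd h.symm hq
        · exact h
      obtain ⟨pre, ms, post, hsplit, hpre, hpost⟩ := ih (List.nodup_cons.mp hnd).2 hmem'
      exact ⟨q :: pre, ms, post, by simp [hsplit], by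
        intro p hp
        rcases List.mem_cons.mp hp with rfl | hp'
        · exact hq
        · exact hpre p hp', hpost⟩

lemma pvMain (l : List (String × String)) (d : PySem.Dict String (PySem.Dict String (List String))) :
    l.foldl (fun d q => pvAssign d q.1 q.2) d
      = (pvGroupIndex l).items.foldl (fun d q => pvProcessGroup d q.1 q.2) d := by
  induction l using List.reverseRecOn with
  | nil => rfl
  | append_singleton l' q ih =>
    rw [List.foldl_append]
    simp only [List.foldl_cons, List.foldl_nil]
    rw [ih]
    have hGI : pvGroupIndex (l' ++ [q])
        = (pvGroupIndex l').insert q.2 ((pvGroupIndex l').getD q.2 [] ++ [q.1]) := by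
      unfold pvGroupIndex
      rw [List.foldl_append]
      simp [PySem.Dict.modify]
    rw [hGI]
    by_cases hc : (pvGroupIndex l').contains q.2
    · have hnd : ((pvGroupIndex l').items.map (·.1)).Nodup := pvGroupIndex_nodup l'
      have hmem : q.2 ∈ (pvGroupIndex l').items.map (·.1) := by
        have := (PySem.Dict.contains_iff_mem_keys (pvGroupIndex l') q.2).mp hc
        simpa [PySem.Dict.keys] using this
      obtain ⟨pre, ms, post, hsplit, hpre, hpost⟩ :=
        pvSplit_of_mem (pvGroupIndex l').items q.2 hnd hmem
      have hms : (pvGroupIndex l').getD q.2 [] = ms := by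
        apply PySem.Dict.getD_of_mem_items
        · rw [hsplit]; simp
        · exact pvGroupIndex_nodup l'
      have hitems : ((pvGroupIndex l').insert q.2 ((pvGroupIndex l').getD q.2 [] ++ [q.1])).items
          = pre ++ (q.2, ms ++ [q.1]) :: post := by
        rw [PySem.Dict.items_insert_of_contains _ _ hc, hsplit, hms]
        simp only [List.map_append, List.map_cons]
        congr 1
        · apply (List.map_congr_left ?_).trans (List.map_id _)
          intro p hp
          simp [show (p.1 == q.2) = false from by simp [hpre p hp]]
        · congr 1
          · simp
          · apply (List.map_congr_left ?_).trans (List.map_id _)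
            intro p hp
            simp [show (p.1 == q.2) = false from by simp [hpost p hp]]
      rw [hitems, List.foldl_append, List.foldl_cons]
      rw [← pvAssign_processGroup]
      have hc2 : (pvProcessGroup (List.foldl (fun d q => pvProcessGroup d q.1 q.2) d pre) q.2
          ms).contains q.2 = true := by
        rw [pvProcessGroup_eq]
        exact PySem.Dict.contains_insert_self _ _ _
      rw [pvAssign_fold_comm post _ q.1 hpost hc2]
      rw [hsplit, List.foldl_append, List.foldl_cons]
    · have hcf : (pvGroupIndex l').contains q.2 = false := by simpa using hc
      have hg0 : (pvGroupIndex l').getD q.2 [] = [] :=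
        PySem.Dict.getD_of_not_contains _ _ hcf
      rw [PySem.Dict.items_insert_of_not_contains _ _ hcf, hg0]
      rw [List.foldl_append]
      simp only [List.foldl_cons, List.foldl_nil, List.nil_append]
      rw [pvProcessGroup_eq]
      rfl

lemma pvBridgeA (devices : List (String × List (String × String)))
    (d : PySem.Dict String (PySem.Dict String (List String))) :
    devices.foldl (fun d p => pvApplyDevA d p.1 (PySem.Dict.mk p.2)) d
      = (pvGrouped devices).foldl (fun d q => pvAssign d q.1 q.2) d := by
  induction devices generalizing d with
  | nil => rfl
  | cons p ds ih =>
    simp only [List.foldl_cons]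
    rw [pvApplyDevA_eq]
    cases h : (PySem.Dict.mk p.2).get? "_group" with
    | none => simp only [pvGrouped, List.filterMap_cons, h, Option.map_none]; exact ih _
    | some g =>
      simp only [pvGrouped, List.filterMap_cons, h, Option.map_some, List.foldl_cons]
      exact ih _

lemma pvBridgeB (devices : List (String × List (String × String))) :
    pvIndex devices = pvGroupIndex (pvGrouped devices) := by
  have aux : ∀ (ds : List (String × List (String × String)))
      (G : PySem.Dict String (List String)),
      ds.foldl (fun g p =>
        match (PySem.Dict.mk p.2).get? "_group" with
        | none => g
        | some gk => g.modify gk [] (· ++ [p.1])) G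
      = (pvGrouped ds).foldl (fun G q => G.modify q.2 [] (· ++ [q.1])) G := by
    intro ds
    induction ds with
    | nil => intro G; rfl
    | cons p ds ih =>
      intro G
      simp only [List.foldl_cons]
      cases h : (PySem.Dict.mk p.2).get? "_group" with
      | none => simp only [pvGrouped, List.filterMap_cons, h, Option.map_none]; exact ih _
      | some g =>
        simp only [pvGrouped, List.filterMap_cons, h, Option.map_some, List.foldl_cons]
        exact ih _
  exact aux devices PySem.Dict.empty

-- ===== VERDICT (by name: the statement is the Claim_ definition above) =====
theorem auto_add_devices_to_groups_spec : Claim_equal_auto_add_devices_to_groups := by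
  intro bc devices _
  unfold Spec_auto_add_devices_to_groups auto_add_devices_to_groups auto_add_devices_to_groups_alt
  rw [pvBridgeA, pvMain, pvBridgeB]
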